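-- pv_equiv track=rewrite | github.com/Bratpfannengamer/machine_learning_tools | My_Machine_Learning_Tools.py | _modelversions_format_versions
-- ===== SOURCE A (Python) =====
-- def _modelversions_format_versions(versions):
--     """
--     Formatiert eine Liste von Versionsnummern zu einem lesbaren String von zusammenhängenden Bereichen.
--
--     Parameters:
--     versions (list of int): Eine sortierte Liste von Versionsnummern.
--
--     Returns:
--     str: Ein formatierter String, der die zusammenhängenden Bereiche von Versionsnummern darstellt.
--
--     Example:
--     >>> format_versions([1, 2, 3, 5, 6, 7, 9])
--     '1-3, 5-7, 9'
--
--     >>> format_versions([1, 2, 3])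
--     '1-3'
--
--     >>> format_versions([1])
--     '1'
--     """
--     formatted_versions = []
--     start = versions[0]
--     end = versions[0]
--
--     for i in range(1, len(versions)):
--         if versions[i] == end + 1:
--             end = versions[i]
--         else:
--             if start == end:
--                 formatted_versions.append(str(start))
--             else:
--                 formatted_versions.append(f"{start}-{end}")
--             start = versions[i]
--             end = versions[i]
--
--     # Handle the last range
--     if start == end:
--         formatted_versions.append(str(start))
--     else:
--         formatted_versions.append(f"{start}-{end}")
--
--     return ", ".join(formatted_versions)
-- ===== SOURCE B (Python) =====
-- def _modelversions_format_versions(versions):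
--     # Skip-pointer decomposition: an outer loop over run starts; the inner scan
--     # finds each run's extent via the value-minus-index key, the endpoints are
--     # then computed arithmetically (base + run - 1) instead of being tracked.
--     pieces = []
--     p, n = 0, len(versions)
--     while p < n:
--         base = versions[p]
--         run = next((j for j in range(1, n - p) if versions[p + j] - j != base), n - p)
--         pieces.append(str(base) if run == 1 else f"{base}-{base + run - 1}")
--         p += run
--     return ", ".join(pieces)
-- ===== Notes on version B (the rewrite author's own statement) =====
-- stated objective: alternative
-- what changed: B drops A's element-wise start/end state machine for a skip-pointer loop over run starts: an inner scan finds each run's extent via the value-minus-index key and the endpoints are computed arithmetically (base + run - 1), so no running end variable and no per-element append decision.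
import Mathlib
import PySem

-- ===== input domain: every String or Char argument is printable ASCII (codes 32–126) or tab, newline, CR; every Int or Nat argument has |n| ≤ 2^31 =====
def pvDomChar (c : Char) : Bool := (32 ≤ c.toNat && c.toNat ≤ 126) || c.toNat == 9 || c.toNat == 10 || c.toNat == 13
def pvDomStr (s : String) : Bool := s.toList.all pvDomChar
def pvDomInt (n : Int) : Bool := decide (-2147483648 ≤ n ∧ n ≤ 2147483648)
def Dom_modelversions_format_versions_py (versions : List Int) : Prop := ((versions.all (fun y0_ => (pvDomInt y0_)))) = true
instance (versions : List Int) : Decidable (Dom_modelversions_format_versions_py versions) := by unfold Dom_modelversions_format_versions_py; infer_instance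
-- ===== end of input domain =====

-- B replaces A's element-wise start/end state machine by a skip-pointer loop over run
-- starts (inner scan finds each run's extent via the value-minus-index key, endpoints
-- computed arithmetically); objective: alternative decomposition, same O(n) cost.

-- ===== PORT A =====
-- str(start) / f"{start}-{end}" branch of A, shared by both append sites
def pvFmtA (s e : Int) : String :=
  if s = e then PySem.Int.toStr s
  else PySem.Int.toStr s ++ "-" ++ PySem.Int.toStr e

-- A's loop body: state is (formatted_versions, start, end), argument is versions[i]
def pvStepA (st : List String × Int × Int) (vi : Int) : List String × Int × Int :=
  match st with
  | (acc, s, e) =>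
    if vi = e + 1 then (acc, s, vi)
    else (acc ++ [pvFmtA s e], vi, vi)

def modelversions_format_versions_py (versions : List Int) : String :=
  match versions with
  | [] => ""  -- unreachable: Python raises IndexError reading the first element; excluded by Pre_
  | v0 :: _ =>
    let st := (PySem.List.pyRange 1 (versions.length : Int) 1).foldl
      (fun st i => pvStepA st (PySem.List.pyGetD versions i 0)) ([], v0, v0)
    match st with
    | (acc, s, e) => PySem.Str.join ", " (acc ++ [pvFmtA s e])

-- ===== PORT B =====
-- Source B's piece formatter: str(base) if run == 1 else f"{base}-{base + run - 1}"
def pvPiece (base run : Int) : String :=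
  if run = 1 then PySem.Int.toStr base
  else PySem.Int.toStr base ++ "-" ++ PySem.Int.toStr (base + run - 1)

-- next((j for j in range(1, n - p) if versions[p + j] - j != base), n - p)
def pvFindBreak (versions : List Int) (p base : Int) : Int :=
  match (PySem.List.pyRange 1 ((versions.length : Int) - p) 1).find?
      (fun j => decide (PySem.List.pyGetD versions (p + j) 0 - j ≠ base)) with
  | some j => j
  | none => (versions.length : Int) - p

-- needed by pvLoopB's termination proof (cited in decreasing_by)
lemma pvFindBreak_pos (versions : List Int) (p base : Int) (h : p < (versions.length : Int)) :
    1 ≤ pvFindBreak versions p base := by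
  unfold pvFindBreak
  rcases hf : (PySem.List.pyRange 1 ((versions.length : Int) - p) 1).find?
      (fun j => decide (PySem.List.pyGetD versions (p + j) 0 - j ≠ base)) with _ | j
  · simp only; omega
  · have := List.mem_of_find?_eq_some hf
    rw [PySem.List.mem_pyRange_one] at this
    simp only
    omega

-- Source B's while loop: state is (pieces, p)
def pvLoopB (versions : List Int) (pieces : List String) (p : Int) : List String :=
  if h : p < (versions.length : Int) then
    let base := PySem.List.pyGetD versions p 0
    let run := pvFindBreak versions p base
    pvLoopB versions (pieces ++ [pvPiece base run]) (p + run)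
  else pieces
termination_by ((versions.length : Int) - p).toNat
decreasing_by
  have := pvFindBreak_pos versions p (PySem.List.pyGetD versions p 0) h
  omega

def modelversions_format_versions_py_alt (versions : List Int) : String :=
  PySem.Str.join ", " (pvLoopB versions [] 0)

-- ===== PRECONDITION & SPEC =====
-- Pre_ excludes only the empty list, on which A raises IndexError reading the first element.
def Pre_modelversions_format_versions_py (versions : List Int) : Prop := versions ≠ []
instance (versions : List Int) : Decidable (Pre_modelversions_format_versions_py versions) := by
  unfold Pre_modelversions_format_versions_py; infer_instance

def pvWitness_modelversions_format_versions_py : List Int := [1, 2, 3, 5, 6, 7, 9]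

def Spec_modelversions_format_versions_py (versions : List Int) (out : String) : Prop := out = modelversions_format_versions_py_alt versions
instance (versions : List Int) (out : String) : Decidable (Spec_modelversions_format_versions_py versions out) := by unfold Spec_modelversions_format_versions_py; infer_instance

-- ===== CLAIM (what is proved, stated in full; the proofs are below) =====
def Claim_equal_modelversions_format_versions_py : Prop := ∀ (versions : List Int), Dom_modelversions_format_versions_py versions → Pre_modelversions_format_versions_py versions → Spec_modelversions_format_versions_py versions (modelversions_format_versions_py versions)

-- ===== LEMMAS AND PROOFS =====

-- the consecutive run [s..e] (s ≤ e) as a list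
def pvRun (s e : Int) : List Int := PySem.List.pyRange s (e + 1) 1

-- A's final state to its appended piece list
def pvFin (st : List String × Int × Int) : List String := st.1 ++ [pvFmtA st.2.1 st.2.2]

lemma pvRun_singleton (v : Int) : pvRun v v = [v] := by
  unfold pvRun; exact PySem.List.pyRange_one_singleton v

lemma pvRun_snoc (s e : Int) (h : s ≤ e) : pvRun s e ++ [e + 1] = pvRun s (e + 1) := by
  unfold pvRun
  rw [PySem.List.pyRange_one_succ_right (by omega : s ≤ e + 1)]

lemma pvRun_length (s e : Int) : (pvRun s e).length = (e + 1 - s).toNat := by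
  unfold pvRun; exact PySem.List.length_pyRange_one s (e + 1)

lemma pvFin_ne_nil (st : List String × Int × Int) : pvFin st ≠ [] := by
  unfold pvFin; simp

-- join over ", " : cons with nonempty tail
lemma pvJoin_cons (x : String) (ys : List String) (h : ys ≠ []) :
    PySem.Str.join ", " (x :: ys) = x ++ ", " ++ PySem.Str.join ", " ys := by
  rcases ys with _ | ⟨y, t⟩
  · exact absurd rfl h
  · rw [← String.toList_inj]
    rw [PySem.Str.toList_join]
    simp only [List.map_cons, PySem.Chars.join_cons_cons, String.toList_append]
    rw [PySem.Str.toList_join]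
    simp

-- accumulator shift for A's fold
lemma pvFoldA_acc (rest : List Int) : ∀ (acc : List String) (s e : Int),
    pvFin (rest.foldl pvStepA (acc, s, e)) = acc ++ pvFin (rest.foldl pvStepA ([], s, e)) := by
  induction rest with
  | nil => intro acc s e; simp [pvFin]
  | cons v t ih =>
    intro acc s e
    simp only [List.foldl_cons, pvStepA]
    by_cases hv : v = e + 1
    · simp only [if_pos hv]; exact ih acc s v
    · simp only [if_neg hv]
      rw [ih (acc ++ [pvFmtA s e]) v v]
      rw [show ([] : List String) ++ [pvFmtA s e] = [pvFmtA s e] from rfl,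
          ih [pvFmtA s e] v v]
      simp

-- find? respects pointwise-equal predicates on members
lemma pvFind?_congr {α : Type} (l : List α) (p q : α → Bool)
    (h : ∀ a ∈ l, p a = q a) : l.find? p = l.find? q := by
  induction l with
  | nil => rfl
  | cons x t ih =>
    simp only [List.find?_cons]
    rw [h x (List.mem_cons_self)]
    rcases hq : q x with _ | _
    · simp only; exact ih (fun a ha => h a (List.mem_cons_of_mem _ ha))
    · simp only

-- pyGetD through a left append, in-range
lemma pvGetD_append_shift (xs ys : List Int) (q : Int) (h0 : 0 ≤ q) (h1 : q < (ys.length : Int)) :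
    PySem.List.pyGetD (xs ++ ys) ((xs.length : Int) + q) 0 = PySem.List.pyGetD ys q 0 := by
  have hq : ((xs.length : Int) + q).toNat = xs.length + q.toNat := by omega
  rw [PySem.List.pyGetD_eq_getElem _ _ (by omega) (by simp; omega),
      PySem.List.pyGetD_eq_getElem _ _ h0 (by omega)]
  simp only [hq]
  rw [List.getElem_append_right (by omega)]
  congr 1
  omega

lemma pvFindBreak_shift (xs ys : List Int) (p base : Int) (h0 : 0 ≤ p) :
    pvFindBreak (xs ++ ys) ((xs.length : Int) + p) base = pvFindBreak ys p base := by
  unfold pvFindBreak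
  have hlen : (((xs ++ ys).length : Int)) - ((xs.length : Int) + p) = (ys.length : Int) - p := by
    rw [List.length_append]; push_cast; ring
  rw [hlen]
  have hcong : ∀ j ∈ PySem.List.pyRange 1 ((ys.length : Int) - p) 1,
      (decide (PySem.List.pyGetD (xs ++ ys) (((xs.length : Int) + p) + j) 0 - j ≠ base)) =
      (decide (PySem.List.pyGetD ys (p + j) 0 - j ≠ base)) := by
    intro j hj
    rw [PySem.List.mem_pyRange_one] at hj
    have hx : ((xs.length : Int) + p) + j = (xs.length : Int) + (p + j) := by ring
    rw [hx, pvGetD_append_shift xs ys (p + j) (by omega) (by omega)]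
  rw [pvFind?_congr _ _ _ hcong]

-- elements of the run part index as s + j
lemma pvRun_getD (s e : Int) (rest : List Int) (j : Int) (h0 : 0 ≤ j) (h1 : j < e + 1 - s) :
    PySem.List.pyGetD (pvRun s e ++ rest) j 0 = s + j := by
  rw [PySem.List.pyGetD_eq_getElem _ _ h0 (by simp [pvRun_length]; omega)]
  rw [List.getElem_append_left (by rw [pvRun_length]; omega)]
  unfold pvRun
  rw [PySem.List.getElem_pyRange_one]
  omega

-- the inner scan on a run-headed list finds exactly the run length
lemma pvFindBreak_run (s e : Int) (rest : List Int) (hse : s ≤ e)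
    (hbr : ∀ h ∈ rest.head?, h ≠ e + 1) :
    pvFindBreak (pvRun s e ++ rest) 0 s = e + 1 - s := by
  have hL1 : (1 : Int) ≤ e + 1 - s := by omega
  have hrl : ((pvRun s e).length : Int) = e + 1 - s := by
    rw [pvRun_length]; omega
  have hfalse : ∀ j ∈ PySem.List.pyRange 1 (e + 1 - s) 1,
      ¬ ((decide (PySem.List.pyGetD (pvRun s e ++ rest) (0 + j) 0 - j ≠ s)) = true) := by
    intro j hj
    rw [PySem.List.mem_pyRange_one] at hj
    rw [zero_add, pvRun_getD s e rest j (by omega) hj.2]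
    simp
  unfold pvFindBreak
  cases rest with
  | nil =>
    have hn : (((pvRun s e ++ ([] : List Int)).length : Int)) - 0 = e + 1 - s := by
      simp [hrl]
    rw [hn, List.find?_eq_none.mpr (by simpa using hfalse)]
  | cons h t =>
    have hnl : (((pvRun s e ++ h :: t).length : Int)) - 0 = (e + 1 - s) + (1 + (t.length : Int)) := by
      simp; omega
    rw [hnl]
    rw [PySem.List.pyRange_one_append 1 (e + 1 - s) ((e + 1 - s) + (1 + (t.length : Int)))
      hL1 (by omega)]
    rw [List.find?_append, List.find?_eq_none.mpr (by simpa using hfalse)]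
    rw [PySem.List.pyRange_one_cons (by omega)]
    have hpred : (decide (PySem.List.pyGetD (pvRun s e ++ h :: t) (0 + (e + 1 - s)) 0 - (e + 1 - s) ≠ s)) = true := by
      have hx : (0 : Int) + (e + 1 - s) = ((pvRun s e).length : Int) + 0 := by omega
      rw [hx, pvGetD_append_shift (pvRun s e) (h :: t) 0 le_rfl (by simp)]
      have hh : h ≠ e + 1 := hbr h rfl
      simp only [PySem.List.pyGetD_zero_cons]
      simp
      omega
    rw [List.find?_cons_of_pos (p := fun j => decide (PySem.List.pyGetD (pvRun s e ++ h :: t) (0 + j) 0 - j ≠ s)) hpred]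
    simp

lemma pvLoopB_stop (versions : List Int) (pieces : List String) (p : Int)
    (hp : ¬ p < (versions.length : Int)) : pvLoopB versions pieces p = pieces := by
  rw [pvLoopB]
  simp [hp]

-- accumulator shift for B's loop
lemma pvLoopB_acc (versions : List Int) : ∀ (m : Nat) (p : Int) (pieces : List String),
    (((versions.length : Int) - p).toNat ≤ m) →
    pvLoopB versions pieces p = pieces ++ pvLoopB versions [] p := by
  intro m
  induction m with
  | zero =>
    intro p pieces hm
    have hp : ¬ p < (versions.length : Int) := by omega
    rw [pvLoopB_stop versions pieces p hp, pvLoopB_stop versions [] p hp]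
    simp
  | succ m ih =>
    intro p pieces hm
    by_cases hp : p < (versions.length : Int)
    · have hrun := pvFindBreak_pos versions p (PySem.List.pyGetD versions p 0) hp
      rw [pvLoopB]
      conv_rhs => rw [pvLoopB]
      simp only [dif_pos hp]
      rw [ih (p + pvFindBreak versions p (PySem.List.pyGetD versions p 0))
            (pieces ++ [pvPiece (PySem.List.pyGetD versions p 0)
              (pvFindBreak versions p (PySem.List.pyGetD versions p 0))]) (by omega),
          ih (p + pvFindBreak versions p (PySem.List.pyGetD versions p 0))
            ([] ++ [pvPiece (PySem.List.pyGetD versions p 0)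
              (pvFindBreak versions p (PySem.List.pyGetD versions p 0))]) (by omega)]
      simp
    · rw [pvLoopB_stop versions pieces p hp, pvLoopB_stop versions [] p hp]
      simp

-- B's loop ignores a consumed prefix
lemma pvLoopB_shift (xs ys : List Int) : ∀ (m : Nat) (p : Int), 0 ≤ p →
    (((ys.length : Int) - p).toNat ≤ m) →
    pvLoopB (xs ++ ys) [] ((xs.length : Int) + p) = pvLoopB ys [] p := by
  intro m
  induction m with
  | zero =>
    intro p h0 hm
    have hp : ¬ p < (ys.length : Int) := by omega
    have hp' : ¬ ((xs.length : Int) + p) < (((xs ++ ys).length : Int)) := by simp; omega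
    rw [pvLoopB_stop _ _ _ hp', pvLoopB_stop _ _ _ hp]
  | succ m ih =>
    intro p h0 hm
    by_cases hp : p < (ys.length : Int)
    · have hp' : ((xs.length : Int) + p) < (((xs ++ ys).length : Int)) := by simp; omega
      have hbase := pvGetD_append_shift xs ys p h0 hp
      have hbrk := pvFindBreak_shift xs ys p (PySem.List.pyGetD ys p 0) h0
      have hrun := pvFindBreak_pos ys p (PySem.List.pyGetD ys p 0) hp
      rw [pvLoopB]
      conv_rhs => rw [pvLoopB]
      simp only [dif_pos hp, dif_pos hp', hbase, hbrk]
      rw [pvLoopB_acc (xs ++ ys) ((((xs ++ ys).length : Int)) -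
            (((xs.length : Int) + p) + pvFindBreak ys p (PySem.List.pyGetD ys p 0))).toNat
            _ _ le_rfl,
          pvLoopB_acc ys (((ys.length : Int) -
            (p + pvFindBreak ys p (PySem.List.pyGetD ys p 0))).toNat)
            _ _ le_rfl]
      have hassoc : ((xs.length : Int) + p) + pvFindBreak ys p (PySem.List.pyGetD ys p 0) =
          (xs.length : Int) + (p + pvFindBreak ys p (PySem.List.pyGetD ys p 0)) := by ring
      rw [hassoc, ih (p + pvFindBreak ys p (PySem.List.pyGetD ys p 0)) (by omega) (by omega)]
    · have hp' : ¬ ((xs.length : Int) + p) < (((xs ++ ys).length : Int)) := by simp; omega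
      rw [pvLoopB_stop _ _ _ hp', pvLoopB_stop _ _ _ hp]

lemma pvPiece_run (s e : Int) (_h : s ≤ e) : pvPiece s (e + 1 - s) = pvFmtA s e := by
  unfold pvPiece pvFmtA
  by_cases hse : s = e
  · simp [hse]
  · have h1 : ¬(e + 1 - s = 1) := by omega
    simp [h1, hse]

-- one outer iteration of B's loop consumes exactly one run
lemma pvLoopB_run_step (s e : Int) (rest : List Int) (hse : s ≤ e)
    (hbr : ∀ h ∈ rest.head?, h ≠ e + 1) :
    pvLoopB (pvRun s e ++ rest) [] 0 = pvFmtA s e :: pvLoopB rest [] 0 := by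
  have hrl : ((pvRun s e).length : Int) = e + 1 - s := by rw [pvRun_length]; omega
  have hn : (0 : Int) < (((pvRun s e ++ rest).length : Int)) := by simp; omega
  rw [pvLoopB]
  simp only [dif_pos hn]
  have hbase : PySem.List.pyGetD (pvRun s e ++ rest) 0 0 = s := by
    have := pvRun_getD s e rest 0 le_rfl (by omega)
    simpa using this
  rw [hbase, pvFindBreak_run s e rest hse hbr, pvPiece_run s e hse]
  rw [pvLoopB_acc (pvRun s e ++ rest)
        ((((pvRun s e ++ rest).length : Int)) - (0 + (e + 1 - s))).toNat _ _ le_rfl]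
  have hidx : (0 : Int) + (e + 1 - s) = ((pvRun s e).length : Int) + 0 := by omega
  rw [hidx, pvLoopB_shift (pvRun s e) rest ((rest.length : Int) - 0).toNat 0 le_rfl le_rfl]
  simp

lemma pvLoopB_ne_nil (rest : List Int) (h : rest ≠ []) : pvLoopB rest [] 0 ≠ [] := by
  have hn : (0 : Int) < (rest.length : Int) := by
    cases rest with
    | nil => exact absurd rfl h
    | cons x t => simp
  rw [pvLoopB]
  simp only [dif_pos hn]
  rw [pvLoopB_acc rest (((rest.length : Int) -
        (0 + pvFindBreak rest 0 (PySem.List.pyGetD rest 0 0))).toNat) _ _ le_rfl]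
  simp

-- main correspondence: A's fold over the tail vs B's run-jumping loop
lemma pvMain (rest : List Int) : ∀ (s e : Int), s ≤ e →
    PySem.Str.join ", " (pvFin (rest.foldl pvStepA ([], s, e))) =
    PySem.Str.join ", " (pvLoopB (pvRun s e ++ rest) [] 0) := by
  induction rest with
  | nil =>
    intro s e hse
    rw [pvLoopB_run_step s e [] hse (by intro h hh; simp at hh)]
    rw [pvLoopB_stop [] [] 0 (by simp)]
    simp only [pvFin, List.foldl_nil, List.nil_append]
  | cons h t ih =>
    intro s e hse
    by_cases hv : h = e + 1
    · subst hv
      have hlist : pvRun s e ++ (e + 1) :: t = pvRun s (e + 1) ++ t := by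
        rw [← pvRun_snoc s e hse]; simp
      rw [hlist]
      simp only [List.foldl_cons, pvStepA]
      exact ih s (e + 1) (by omega)
    · simp only [List.foldl_cons, pvStepA, if_neg hv]
      rw [List.nil_append]
      rw [pvFoldA_acc t [pvFmtA s e] h h]
      have hcons : [pvFmtA s e] ++ pvFin (t.foldl pvStepA ([], h, h)) =
          pvFmtA s e :: pvFin (t.foldl pvStepA ([], h, h)) := by simp
      rw [hcons, pvJoin_cons _ _ (pvFin_ne_nil _)]
      rw [pvLoopB_run_step s e (h :: t) hse (by intro x hx; simp at hx; omega)]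
      rw [pvJoin_cons _ _ (pvLoopB_ne_nil (h :: t) (by simp))]
      have := ih h h le_rfl
      rw [pvRun_singleton] at this
      rw [this]
      simp

-- ===== VERDICT (by name: the statements are the Claim_ definitions above) =====
theorem modelversions_format_versions_py_spec : Claim_equal_modelversions_format_versions_py := by
  intro versions _hdom hpre
  unfold Spec_modelversions_format_versions_py
  match versions with
  | [] => exact absurd rfl hpre
  | v0 :: rest =>
    unfold modelversions_format_versions_py modelversions_format_versions_py_alt
    simp only
    rw [PySem.List.foldl_pyRange_pyGetD' (v0 :: rest) 0 pvStepA ([], v0, v0) (a := 1) (by omega)]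
    simp only [Int.toNat_one, List.drop_one, List.tail_cons]
    rcases hA : rest.foldl pvStepA ([], v0, v0) with ⟨acc, s, e⟩
    have := pvMain rest v0 v0 le_rfl
    rw [pvRun_singleton, hA] at this
    simpa [pvFin] using this
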